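-- pv_equiv track=rewrite | github.com/paradniknikita-debug/mobilka | backend/app/api/v1/attachments.py | _extension_for_any_file
-- ===== SOURCE A (Python) =====
-- from typing import Any, Dict, List, Optional
--
-- def _extension_for_any_file(filename: Optional[str], content_type: str) -> str:
--     """Универсальное расширение для типа вложения «file» (любой файл)."""
--     fe = _office_extension_from_filename(filename)
--     if fe:
--         return fe
--     lower = (filename or "").lower()
--     for suffix, ext in (
--         (".mp3", ".mp3"),
--         (".m4a", ".m4a"),
--         (".wav", ".wav"),
--         (".webm", ".webm"),
--         (".ogg", ".ogg"),
--         (".aac", ".aac"),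
--         (".mp4", ".mp4"),
--         (".mov", ".mov"),
--         (".mkv", ".mkv"),
--         (".jpg", ".jpg"),
--         (".jpeg", ".jpg"),
--         (".png", ".png"),
--         (".gif", ".gif"),
--         (".webp", ".webp"),
--         (".svg", ".svg"),
--         (".pdf", ".pdf"),
--         (".zip", ".zip"),
--         (".txt", ".txt"),
--     ):
--         if lower.endswith(suffix):
--             return ext
--     ct = (content_type or "").lower()
--     if ct.startswith("image/"):
--         return ".jpg"
--     if ct.startswith("audio/"):
--         return ".m4a"
--     if ct.startswith("video/"):
--         return ".mp4"
--     return ".bin"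
--
-- def _office_extension_from_filename(filename: Optional[str]) -> str:
--     """Расширение для таблиц/документов по имени файла (при octet-stream)."""
--     lower = (filename or "").lower()
--     for suffix, ext in (
--         (".xlsx", ".xlsx"),
--         (".xls", ".xls"),
--         (".csv", ".csv"),
--         (".docx", ".docx"),
--         (".doc", ".doc"),
--         (".pptx", ".pptx"),
--         (".ppt", ".ppt"),
--         (".ods", ".ods"),
--         (".odt", ".odt"),
--     ):
--         if lower.endswith(suffix):
--             return ext
--     return ""
-- ===== SOURCE B (Python) =====
-- from typing import Optional
--
-- # Bare keys (lowercase, no dot) whose output extension is just "." + key;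
-- # jpg/jpeg are special-cased to ".jpg". Office and general keys never overlap,
-- # so the last-dot key lookup decides in one step.
-- _KEYS = (
--     "xlsx", "xls", "csv", "docx", "doc", "pptx", "ppt", "ods", "odt",
--     "mp3", "m4a", "wav", "webm", "ogg", "aac", "mp4", "mov", "mkv",
--     "png", "gif", "webp", "svg", "pdf", "zip", "txt",
-- )
--
--
-- def _extension_for_any_file(filename: Optional[str], content_type: str) -> str:
--     lower = (filename or "").lower()
--     if "." in lower:
--         key = lower.rsplit(".", 1)[1]
--         if key in ("jpg", "jpeg"):
--             return ".jpg"
--         if key in _KEYS: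
--             return "." + key
--     ct = (content_type or "").lower()
--     if ct.startswith("image/"):
--         return ".jpg"
--     if ct.startswith("audio/"):
--         return ".m4a"
--     if ct.startswith("video/"):
--         return ".mp4"
--     return ".bin"
-- ===== Notes on version B (the rewrite author's own statement) =====
-- stated objective: idiomatic
-- what changed: Replaces A's two sequential endswith-scan loops over 27 (suffix, ext) pairs by computing the text after the last dot once and deciding by key: jpg/jpeg special-cased, otherwise membership in a bare key tuple with the result constructed as '.' + key (no mapping table at all).
import Mathlib
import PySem

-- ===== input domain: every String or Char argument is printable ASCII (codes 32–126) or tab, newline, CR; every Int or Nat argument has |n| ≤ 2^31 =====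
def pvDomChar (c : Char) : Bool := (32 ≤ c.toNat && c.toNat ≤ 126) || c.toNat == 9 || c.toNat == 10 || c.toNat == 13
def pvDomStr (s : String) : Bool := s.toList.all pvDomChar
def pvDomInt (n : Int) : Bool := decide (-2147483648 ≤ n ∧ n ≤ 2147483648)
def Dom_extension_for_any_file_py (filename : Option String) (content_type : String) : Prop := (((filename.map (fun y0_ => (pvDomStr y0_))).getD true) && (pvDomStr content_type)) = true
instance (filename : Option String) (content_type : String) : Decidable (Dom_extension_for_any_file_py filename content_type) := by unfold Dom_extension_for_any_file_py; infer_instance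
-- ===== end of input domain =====

-- B replaces A's two sequential endswith-scan loops by one key-after-the-last-dot
-- computation: jpg/jpeg special-cased, otherwise membership in a bare key tuple with
-- the result built as "." + key (objective: idiomatic; same behaviour proved below).

-- ===== PORT A =====
-- the for-loop "for suffix, ext in (...): if lower.endswith(suffix): return ext"
def pvFirstSuffix (lower : String) : List (String × String) → Option String
  | [] => none
  | (suf, ext) :: rest =>
    if PySem.Str.endswith lower suf then some ext else pvFirstSuffix lower rest

def pvOfficeTable : List (String × String) :=
  [(".xlsx", ".xlsx"), (".xls", ".xls"), (".csv", ".csv"), (".docx", ".docx"),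
   (".doc", ".doc"), (".pptx", ".pptx"), (".ppt", ".ppt"), (".ods", ".ods"),
   (".odt", ".odt")]

def pvFileTable : List (String × String) :=
  [(".mp3", ".mp3"), (".m4a", ".m4a"), (".wav", ".wav"), (".webm", ".webm"),
   (".ogg", ".ogg"), (".aac", ".aac"), (".mp4", ".mp4"), (".mov", ".mov"),
   (".mkv", ".mkv"), (".jpg", ".jpg"), (".jpeg", ".jpg"), (".png", ".png"),
   (".gif", ".gif"), (".webp", ".webp"), (".svg", ".svg"), (".pdf", ".pdf"),
   (".zip", ".zip"), (".txt", ".txt")]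

-- _office_extension_from_filename
def office_extension_from_filename_py (filename : Option String) : String :=
  let lower := PySem.Str.lower (filename.getD "")   -- (filename or "").lower()
  match pvFirstSuffix lower pvOfficeTable with
  | some ext => ext
  | none => ""

def extension_for_any_file_py (filename : Option String) (content_type : String) : String :=
  let fe := office_extension_from_filename_py filename
  if fe ≠ "" then fe                                -- "if fe:"  (nonempty string is truthy)
  else
    let lower := PySem.Str.lower (filename.getD "")
    match pvFirstSuffix lower pvFileTable with
    | some ext => ext
    | none =>
      let ct := PySem.Str.lower content_type        -- (content_type or "").lower()
      if PySem.Str.startswith ct "image/" then ".jpg"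
      else if PySem.Str.startswith ct "audio/" then ".m4a"
      else if PySem.Str.startswith ct "video/" then ".mp4"
      else ".bin"

-- ===== PORT B =====
-- _KEYS of Source B: bare keys whose output is "." + key (no mapping values)
def pvKeys : List String :=
  ["xlsx", "xls", "csv", "docx", "doc", "pptx", "ppt", "ods", "odt",
   "mp3", "m4a", "wav", "webm", "ogg", "aac", "mp4", "mov", "mkv",
   "png", "gif", "webp", "svg", "pdf", "zip", "txt"]

-- lower.rsplit(".", 1)[1]: the text after the LAST dot — exact whenever '.' ∈ lower,
-- which is the only situation B uses it in (guarded by the '"." in lower' check).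
def pvAfterLastDot (cs : List Char) : List Char :=
  (cs.reverse.takeWhile (· != '.')).reverse

-- the content-type fall-through of Source B (reached when the dot branch does not return)
def pvCtExt (ct : String) : String :=
  if PySem.Str.startswith ct "image/" then ".jpg"
  else if PySem.Str.startswith ct "audio/" then ".m4a"
  else if PySem.Str.startswith ct "video/" then ".mp4"
  else ".bin"

def extension_for_any_file_py_alt (filename : Option String) (content_type : String) : String :=
  let lower := PySem.Str.lower (filename.getD "")
  let hit : Option String :=                        -- the dot branch; none = fall through
    if lower.toList.contains '.' then
      let key := String.ofList (pvAfterLastDot lower.toList)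
      if key == "jpg" || key == "jpeg" then some ".jpg"
      else if pvKeys.contains key then some ("." ++ key)
      else none
    else none
  match hit with
  | some ext => ext
  | none => pvCtExt (PySem.Str.lower content_type)

-- ===== PRECONDITION & SPEC =====
def Spec_extension_for_any_file_py (filename : Option String) (content_type : String) (out : String) : Prop := out = extension_for_any_file_py_alt filename content_type
instance (filename : Option String) (content_type : String) (out : String) : Decidable (Spec_extension_for_any_file_py filename content_type out) := by unfold Spec_extension_for_any_file_py; infer_instance

-- ===== CLAIM (what is proved, stated in full; the proofs are below) =====
def Claim_equal_extension_for_any_file_py : Prop := ∀ (filename : Option String) (content_type : String), Dom_extension_for_any_file_py filename content_type → Spec_extension_for_any_file_py filename content_type (extension_for_any_file_py filename content_type)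

-- ===== LEMMAS AND PROOFS =====

-- (k ++ ['.']) is a prefix of r  ↔  r contains a dot and the piece before
-- the first dot of r is exactly k (k dot-free).
theorem pv_prefix_dot_iff (r k : List Char) (hk : '.' ∉ k) :
    (k ++ ['.'] <+: r) ↔ ('.' ∈ r ∧ r.takeWhile (· != '.') = k) := by
  induction r generalizing k with
  | nil => simp
  | cons c r' ih =>
    by_cases hc : c = '.'
    · subst hc
      cases k with
      | nil => simp
      | cons a k' =>
        have ha : a ≠ '.' := fun h => hk (by simp [h])
        constructor
        · intro h
          rcases List.cons_prefix_cons.mp (by simpa using h) with ⟨h1, -⟩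
          exact absurd h1 ha
        · rintro ⟨-, heq⟩
          rw [List.takeWhile_cons] at heq
          simp at heq
    · have hcb : (c != '.') = true := by simp [hc]
      cases k with
      | nil =>
        simp [List.cons_prefix_cons, hcb, Ne.symm hc]
      | cons a k' =>
        have hk' : '.' ∉ k' := fun h => hk (by simp [h])
        by_cases hca : c = a
        · subst hca
          simp [List.cons_prefix_cons, hcb, ih k' hk']
          exact fun _ h => absurd h.symm hc
        · simp [List.cons_prefix_cons, hcb, hca, Ne.symm hca]

-- endswith on a dot-keyed suffix, characterised by the text after the last dot
theorem pv_endswith_key (l k : List Char) (hk : '.' ∉ k) :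
    PySem.Chars.endswith l ('.' :: k) =
      (l.contains '.' && (pvAfterLastDot l == k)) := by
  have hrev : '.' ∉ k.reverse := by simpa using hk
  by_cases h : ('.' :: k) <:+ l
  · have h1 : PySem.Chars.endswith l ('.' :: k) = true := (PySem.Chars.endswith_iff l _).mpr h
    have h2 : k.reverse ++ ['.'] <+: l.reverse := by
      rw [← List.reverse_suffix]; simpa using h
    have h3 := (pv_prefix_dot_iff l.reverse k.reverse hrev).mp h2
    have hc : l.contains '.' = true := by
      have : '.' ∈ l := by simpa using h3.1
      simpa [List.contains_eq_mem] using this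
    have hkey : pvAfterLastDot l = k := by
      unfold pvAfterLastDot
      rw [h3.2]; simp
    simp [h1, hkey]
    simpa [List.contains_eq_mem] using hc
  · have h1 : PySem.Chars.endswith l ('.' :: k) = false := by
      cases he : PySem.Chars.endswith l ('.' :: k)
      · rfl
      · exact absurd ((PySem.Chars.endswith_iff l _).mp he) h
    rw [h1]
    by_cases hc : '.' ∈ l
    · have hc' : l.contains '.' = true := by simpa [List.contains_eq_mem] using hc
      have hne : pvAfterLastDot l ≠ k := by
        intro heq
        apply h
        have htw : l.reverse.takeWhile (· != '.') = k.reverse := by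
          have : (l.reverse.takeWhile (· != '.')).reverse = k := heq
          calc l.reverse.takeWhile (· != '.')
              = ((l.reverse.takeWhile (· != '.')).reverse).reverse := by simp
            _ = k.reverse := by rw [this]
        have h2 : k.reverse ++ ['.'] <+: l.reverse :=
          (pv_prefix_dot_iff l.reverse k.reverse hrev).mpr ⟨by simpa using hc, htw⟩
        have h4 : ('.' :: k).reverse <+: l.reverse := by simpa using h2
        exact List.reverse_prefix.mp h4
      simp [hne]
    · have hc' : l.contains '.' = false := by simpa [List.contains_eq_mem] using hc
      rw [hc', Bool.false_and]

theorem pv_ofList_eq (k : List Char) (a : String) : (String.ofList k = a) ↔ (k = a.toList) := by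
  constructor
  · intro h; rw [← h]; simp
  · intro h; rw [h]; simp

-- first-match scan of a dot-suffix table, re-keyed by the text after the last dot
def pvLook (k : List Char) : List (String × String) → Option String
  | [] => none
  | (suf, ext) :: rest => if k == suf.toList.tail then some ext else pvLook k rest

theorem pv_firstSuffix_eq (lower : String) (tbl : List (String × String))
    (h : ∀ p ∈ tbl, p.1.toList ≠ [] ∧ p.1.toList.head? = some '.' ∧ '.' ∉ p.1.toList.tail) :
    pvFirstSuffix lower tbl =
      if lower.toList.contains '.' then pvLook (pvAfterLastDot lower.toList) tbl else none := by
  induction tbl with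
  | nil => simp [pvFirstSuffix, pvLook]
  | cons p rest ih =>
    obtain ⟨suf, ext⟩ := p
    obtain ⟨hne, hhd, htl⟩ := h (suf, ext) (by simp)
    have hrest : ∀ q ∈ rest, q.1.toList ≠ [] ∧ q.1.toList.head? = some '.' ∧ '.' ∉ q.1.toList.tail :=
      fun q hq => h q (List.mem_cons_of_mem _ hq)
    have hsuf : suf.toList = '.' :: suf.toList.tail := by
      cases hc : suf.toList with
      | nil => exact absurd hc hne
      | cons a t => rw [hc] at hhd; simp only [List.head?_cons, Option.some.injEq] at hhd; simp [hhd]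
    have heq : PySem.Str.endswith lower suf =
        (lower.toList.contains '.' && (pvAfterLastDot lower.toList == suf.toList.tail)) := by
      rw [PySem.Str.endswith_eq, hsuf]; exact pv_endswith_key _ _ htl
    simp only [pvFirstSuffix, pvLook]
    rw [heq, ih hrest]
    cases hc : lower.toList.contains '.' with
    | false => simp
    | true => simp

-- ===== VERDICT (by name: the statement is the Claim_ definition above) =====
theorem extension_for_any_file_py_spec : Claim_equal_extension_for_any_file_py := by
  intro filename content_type _
  simp only [Spec_extension_for_any_file_py, extension_for_any_file_py,
    office_extension_from_filename_py, extension_for_any_file_py_alt]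
  generalize PySem.Str.lower (filename.getD "") = s
  generalize PySem.Str.lower content_type = ct
  rw [pv_firstSuffix_eq s pvOfficeTable (by decide), pv_firstSuffix_eq s pvFileTable (by decide)]
  cases hdot : s.toList.contains '.' with
  | false => rfl
  | true =>
    generalize pvAfterLastDot s.toList = k
    by_cases h0 : k = ['x', 'l', 's', 'x']
    · subst h0; rfl
    by_cases h1 : k = ['x', 'l', 's']
    · subst h1; rfl
    by_cases h2 : k = ['c', 's', 'v']
    · subst h2; rfl
    by_cases h3 : k = ['d', 'o', 'c', 'x']
    · subst h3; rfl
    by_cases h4 : k = ['d', 'o', 'c']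
    · subst h4; rfl
    by_cases h5 : k = ['p', 'p', 't', 'x']
    · subst h5; rfl
    by_cases h6 : k = ['p', 'p', 't']
    · subst h6; rfl
    by_cases h7 : k = ['o', 'd', 's']
    · subst h7; rfl
    by_cases h8 : k = ['o', 'd', 't']
    · subst h8; rfl
    by_cases h9 : k = ['m', 'p', '3']
    · subst h9; rfl
    by_cases h10 : k = ['m', '4', 'a']
    · subst h10; rfl
    by_cases h11 : k = ['w', 'a', 'v']
    · subst h11; rfl
    by_cases h12 : k = ['w', 'e', 'b', 'm']
    · subst h12; rfl
    by_cases h13 : k = ['o', 'g', 'g']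
    · subst h13; rfl
    by_cases h14 : k = ['a', 'a', 'c']
    · subst h14; rfl
    by_cases h15 : k = ['m', 'p', '4']
    · subst h15; rfl
    by_cases h16 : k = ['m', 'o', 'v']
    · subst h16; rfl
    by_cases h17 : k = ['m', 'k', 'v']
    · subst h17; rfl
    by_cases h18 : k = ['j', 'p', 'g']
    · subst h18; rfl
    by_cases h19 : k = ['j', 'p', 'e', 'g']
    · subst h19; rfl
    by_cases h20 : k = ['p', 'n', 'g']
    · subst h20; rfl
    by_cases h21 : k = ['g', 'i', 'f']
    · subst h21; rfl
    by_cases h22 : k = ['w', 'e', 'b', 'p']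
    · subst h22; rfl
    by_cases h23 : k = ['s', 'v', 'g']
    · subst h23; rfl
    by_cases h24 : k = ['p', 'd', 'f']
    · subst h24; rfl
    by_cases h25 : k = ['z', 'i', 'p']
    · subst h25; rfl
    by_cases h26 : k = ['t', 'x', 't']
    · subst h26; rfl
    have hO : pvLook k pvOfficeTable = none := by
      simp [pvLook, pvOfficeTable, h0, h1, h2, h3, h4, h5, h6, h7, h8]
    have hF : pvLook k pvFileTable = none := by
      simp [pvLook, pvFileTable, h9, h10, h11, h12, h13, h14, h15, h16, h17,
        h18, h19, h20, h21, h22, h23, h24, h25, h26]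
    have hjg : (String.ofList k == "jpg") = false := by simp [pv_ofList_eq, h18]
    have hjpg : (String.ofList k == "jpeg") = false := by simp [pv_ofList_eq, h19]
    have hky : pvKeys.contains (String.ofList k) = false := by
      simp [pvKeys, List.contains_eq_mem, pv_ofList_eq, h0, h1, h2, h3, h4, h5, h6, h7, h8,
        h9, h10, h11, h12, h13, h14, h15, h16, h17, h20, h21, h22, h23, h24, h25, h26]
    rw [hO, hF, hjg, hjpg, hky]
    rfl
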